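-- pv_equiv track=rewrite | github.com/Md-Merazul-Islam/OOP-and-Python-Programming | Module 04 Assignment 01/P_Minimize_Number.py | min_opr
-- ===== SOURCE A (Python) =====
-- def min_opr(n, a):
--     all_even = all(x % 2 == 0 for x in a)
--     cnt = 0
--     if (all_even):
--         while (True):
--             for i in range(n):
--                 if (a[i] % 2 != 0):
--                     all_even = False
--                     break
--                 a[i] //= 2
--             if (all_even):
--                 cnt += 1
--             else:
--                 break
--     return cnt
-- ===== SOURCE B (Python) =====
-- def min_opr(n, a):
--     def v2(x):
--         return 1 + v2(x // 2) if x % 2 == 0 and x != 0 else 0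
--     if any(x % 2 for x in a):
--         return 0
--     return min(v2(x) for x in a[:n] if x != 0)
-- ===== Notes on version B (the rewrite author's own statement) =====
-- stated objective: alternative
-- what changed: A repeatedly halves all first-n elements in synchronized passes until one becomes odd, counting passes; B computes each element's 2-adic valuation once and returns the minimum in a single pass.
import Mathlib
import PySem

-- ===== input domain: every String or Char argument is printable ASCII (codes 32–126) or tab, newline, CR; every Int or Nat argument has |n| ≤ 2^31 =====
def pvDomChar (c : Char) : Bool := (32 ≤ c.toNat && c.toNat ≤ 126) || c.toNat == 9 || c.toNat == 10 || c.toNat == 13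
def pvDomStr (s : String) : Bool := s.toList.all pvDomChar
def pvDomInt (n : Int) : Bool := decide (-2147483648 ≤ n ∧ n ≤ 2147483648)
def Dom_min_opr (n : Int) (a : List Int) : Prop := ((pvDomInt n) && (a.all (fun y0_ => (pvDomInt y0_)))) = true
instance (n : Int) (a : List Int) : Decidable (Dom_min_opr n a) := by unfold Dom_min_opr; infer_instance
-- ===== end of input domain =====

-- B replaces A's repeated halve-all-elements passes by a one-pass minimum of per-element
-- 2-adic valuations (objective: alternative / simpler).  A mutates its list argument in
-- place; B does not — the equivalence proved here is about the RETURN value only.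

-- ===== PORT A =====
-- inner 'for i in range(n)' loop: returns the updated list and the all_even flag
def pvForPass : List Int → Nat → Nat → List Int × Bool
  | a, _, 0 => (a, true)
  | a, i, k+1 =>
    match PySem.List.pyGet? a (i : Int) with
    | none => (a, false)          -- IndexError in Python; excluded by Pre_
    | some x =>
      if PySem.Int.mod x 2 ≠ 0 then (a, false)
      else pvForPass (a.set i (PySem.Int.floordiv x 2)) (i+1) k

-- the 'while True' loop; fuel 40 suffices on Dom ∧ Pre_ (elements bounded by 2^31
-- have 2-adic valuation ≤ 31, so at most 32 passes happen before the loop breaks)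
def pvWhile (n : Int) : List Int → Int → Nat → Int
  | _, cnt, 0 => cnt
  | a, cnt, fuel+1 =>
    let r := pvForPass a 0 n.toNat
    if r.2 then pvWhile n r.1 (cnt+1) fuel else cnt

def min_opr (n : Int) (a : List Int) : Int :=
  let all_even := a.all (fun x => PySem.Int.mod x 2 == 0)
  if all_even then pvWhile n a 0 40 else 0

-- ===== PORT B =====
-- v2(x): recursive 2-adic valuation, exactly Source B's helper
def pvV2 (x : Int) : Int :=
  if h : PySem.Int.mod x 2 = 0 ∧ x ≠ 0 then 1 + pvV2 (PySem.Int.floordiv x 2) else 0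
termination_by x.natAbs
decreasing_by
  rw [PySem.Int.floordiv_eq_ediv_of_pos (by omega)]
  have h2 : (2:Int) ∣ x := by
    have := (PySem.Int.mod_eq_zero_iff_dvd x 2).mp h.1
    exact this
  obtain ⟨k, hk⟩ := h2
  subst hk
  have hk0 : k ≠ 0 := by intro h0; simp [h0] at h
  simp [Int.mul_ediv_cancel_left _ (by norm_num : (2:Int) ≠ 0)]
  omega

def min_opr_alt (n : Int) (a : List Int) : Int :=
  if a.any (fun x => PySem.Int.mod x 2 ≠ 0) then 0
  else
    match PySem.List.min?
        (((PySem.List.slice a none (some n)).filter (fun x => x != 0)).map pvV2)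
        (fun v => v) with
    | some m => m
    | none => 0      -- Python's min raises ValueError here; excluded by Pre_

-- ===== PRECONDITION & SPEC =====
-- Pre_ excludes exactly the inputs on which A does not return: when every element of a is
-- even, A raises IndexError if n > len(a), and loops forever if the first n elements are
-- all zero (in particular if n <= 0); on such inputs B raises ValueError or returns.
def Pre_min_opr (n : Int) (a : List Int) : Prop :=
  (∀ x ∈ a, PySem.Int.mod x 2 = 0) → (n ≤ a.length ∧ ∃ x ∈ a.take n.toNat, x ≠ 0)
instance (n : Int) (a : List Int) : Decidable (Pre_min_opr n a) := by
  unfold Pre_min_opr; infer_instance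

def pvWitness_min_opr : Int × List Int := (2, [4, 6])

def Spec_min_opr (n : Int) (a : List Int) (out : Int) : Prop := out = min_opr_alt n a
instance (n : Int) (a : List Int) (out : Int) : Decidable (Spec_min_opr n a out) := by
  unfold Spec_min_opr; infer_instance

-- ===== CLAIM (what is proved, stated in full; the proofs are below) =====
def Claim_equal_min_opr : Prop := ∀ (n : Int) (a : List Int), Dom_min_opr n a → Pre_min_opr n a → Spec_min_opr n a (min_opr n a)

-- ===== LEMMAS AND PROOFS =====

-- the filtered, valued view of the first n elements used throughout the proof
def pvL (n : Int) (a : List Int) : List Int :=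
  ((a.take n.toNat).filter (fun x => x != 0)).map pvV2

theorem pvFoldlMin (t : List Int) : ∀ (x : Int),
    (t.map (fun v => v - 1)).foldl min (x - 1) = (t.foldl min x) - 1 := by
  induction t with
  | nil => intro x; simp
  | cons y t ih =>
    intro x
    simp only [List.map_cons, List.foldl_cons]
    rw [min_sub_sub_right, ih]

theorem pvV2_nonneg (x : Int) : 0 ≤ pvV2 x := by
  fun_induction pvV2 x with
  | case1 x h ih => omega
  | case2 x h => simp

theorem pvV2_odd (x : Int) (h : PySem.Int.mod x 2 ≠ 0) : pvV2 x = 0 := by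
  have h' : ¬ (2:Int) ∣ x := fun hd => h ((PySem.Int.mod_eq_zero_iff_dvd x 2).mpr hd)
  rw [pvV2]; simp [h']

theorem pvV2_even (x : Int) (h : PySem.Int.mod x 2 = 0) (hx : x ≠ 0) :
    pvV2 (PySem.Int.floordiv x 2) = pvV2 x - 1 := by
  have hd : (2:Int) ∣ x := (PySem.Int.mod_eq_zero_iff_dvd x 2).mp h
  conv_rhs => rw [pvV2]
  simp [hd, hx]

theorem pvMod0 (x : Int) (h : PySem.Int.mod x 2 ≠ 0) : x ≠ 0 := by
  intro h0; subst h0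
  rw [PySem.Int.mod_eq_emod_of_pos (by norm_num)] at h
  simp at h

theorem pvMemL (n : Int) (a : List Int) (v : Int) (hv : v ∈ pvL n a) : 0 ≤ v := by
  unfold pvL at hv
  obtain ⟨x, _, hx⟩ := List.mem_map.mp hv
  exact hx ▸ pvV2_nonneg x

theorem pvV2_le_pow (k : Nat) (x : Int) (hx : x ≠ 0) (hb : x.natAbs ≤ 2 ^ k) :
    pvV2 x ≤ (k : Int) := by
  induction k generalizing x with
  | zero =>
    have : x = 1 ∨ x = -1 := by omega
    rcases this with h1 | h1 <;> subst h1 <;> rw [pvV2] <;> norm_num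
  | succ k ih =>
    by_cases he : PySem.Int.mod x 2 = 0
    · have hd : (2:Int) ∣ x := (PySem.Int.mod_eq_zero_iff_dvd x 2).mp he
      obtain ⟨y, hy⟩ := hd
      have hy0 : y ≠ 0 := by intro h0; simp [h0] at hy; exact hx hy
      have hfd : PySem.Int.floordiv x 2 = y := by
        rw [PySem.Int.floordiv_eq_ediv_of_pos (by omega), hy, Int.mul_ediv_cancel_left _ (by norm_num)]
      have := pvV2_even x he hx
      rw [hfd] at this
      have hb' : y.natAbs ≤ 2 ^ k := by
        have : x.natAbs = 2 * y.natAbs := by rw [hy]; simp [Int.natAbs_mul]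
        omega
      have := ih y hy0 hb'
      push_cast
      omega
    · rw [pvV2_odd x he]; positivity

theorem pvPass_even (k : Nat) : ∀ (c b : List Int), k ≤ b.length →
    (∀ x ∈ b.take k, PySem.Int.mod x 2 = 0) →
    pvForPass (c ++ b) c.length k =
      (c ++ (b.take k).map (fun x => PySem.Int.floordiv x 2) ++ b.drop k, true) := by
  induction k with
  | zero => intro c b _ _; simp [pvForPass]
  | succ k ih =>
    intro c b hk he
    match b with
    | [] => simp at hk
    | x :: b' =>
      have hget : PySem.List.pyGet? (c ++ x :: b') (c.length : Int) = some x :=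
        PySem.List.pyGet?_append_length c b' x
      have hx : PySem.Int.mod x 2 = 0 := he x (by simp)
      have hset : (c ++ x :: b').set c.length (PySem.Int.floordiv x 2)
          = (c ++ [PySem.Int.floordiv x 2]) ++ b' := by
        simp
      rw [pvForPass, hget]
      simp only [hx, ne_eq, not_true_eq_false, if_neg, not_false_iff]
      rw [hset]
      have : c.length + 1 = (c ++ [PySem.Int.floordiv x 2]).length := by simp
      rw [this, ih (c ++ [PySem.Int.floordiv x 2]) b' (by simpa using hk)
        (fun y hy => he y (by simp [hy]))]
      simp

theorem pvPass_odd (k : Nat) : ∀ (c b : List Int),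
    (∃ x ∈ b.take k, PySem.Int.mod x 2 ≠ 0) →
    (pvForPass (c ++ b) c.length k).2 = false := by
  induction k with
  | zero => intro c b h; simp at h
  | succ k ih =>
    intro c b h
    match b with
    | [] => simp at h
    | x :: b' =>
      have hget : PySem.List.pyGet? (c ++ x :: b') (c.length : Int) = some x :=
        PySem.List.pyGet?_append_length c b' x
      rw [pvForPass, hget]
      by_cases hx : PySem.Int.mod x 2 = 0
      · simp only [hx, ne_eq, not_true_eq_false, if_neg, not_false_iff]
        have hset : (c ++ x :: b').set c.length (PySem.Int.floordiv x 2)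
            = (c ++ [PySem.Int.floordiv x 2]) ++ b' := by
          simp
        rw [hset]
        have hl : c.length + 1 = (c ++ [PySem.Int.floordiv x 2]).length := by simp
        rw [hl]
        apply ih
        rw [List.take_succ_cons] at h
        obtain ⟨y, hy, hyo⟩ := h
        rcases List.mem_cons.mp hy with hy1 | hy1
        · exact (hyo (hy1 ▸ hx)).elim
        · exact ⟨y, hy1, hyo⟩
      · have h1 : x % 2 = 1 := by
          have hm : PySem.Int.mod x 2 = x % 2 := PySem.Int.mod_eq_emod_of_pos (by norm_num)
          have := Int.emod_two_eq x
          omega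
        simp [h1]

theorem pvW (n : Int) (fuel : Nat) :
    ∀ (a : List Int) (cnt m : Int),
      n.toNat ≤ a.length →
      PySem.List.min? (pvL n a) (fun v => v) = some m →
      m < (fuel : Int) →
      pvWhile n a cnt fuel = cnt + m := by
  induction fuel with
  | zero =>
    intro a cnt m _ hmin hf
    have := pvMemL n a m (PySem.List.min?_mem hmin)
    simp at hf; omega
  | succ fuel ih =>
    intro a cnt m hn hmin hf
    have hmem := PySem.List.min?_mem hmin
    have hlow := PySem.List.min?_isMin hmin
    by_cases hodd : ∃ x ∈ a.take n.toNat, PySem.Int.mod x 2 ≠ 0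
    · -- some odd element among the first n: the pass breaks, cnt is returned, and m = 0
      have hpass : (pvForPass a 0 n.toNat).2 = false := by
        have := pvPass_odd n.toNat [] a hodd
        simpa using this
      have hm0 : m = 0 := by
        obtain ⟨x, hx1, hx2⟩ := hodd
        have hx0 : x ≠ 0 := pvMod0 x hx2
        have : pvV2 x ∈ pvL n a := by
          unfold pvL
          exact List.mem_map.mpr ⟨x, List.mem_filter.mpr ⟨hx1, by simpa using hx0⟩, rfl⟩
        have h1 := hlow (pvV2 x) this
        have h2 := pvMemL n a m hmem
        have h3 := pvV2_odd x hx2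
        simp at h1
        omega
      subst hm0
      simp [pvWhile, hpass]
    · push Not at hodd
      have he : ∀ x ∈ a.take n.toNat, PySem.Int.mod x 2 = 0 := hodd
      have hpass := pvPass_even n.toNat [] a hn he
      simp only [List.nil_append, List.length_nil] at hpass
      set h2 := fun x => PySem.Int.floordiv x 2 with hh2
      set a' := (a.take n.toNat).map h2 ++ a.drop n.toNat with ha'
      have hlen' : a'.length = a.length := by
        simp [ha', List.length_take, Nat.min_eq_left hn]
        omega
      have htake : a'.take n.toNat = (a.take n.toNat).map h2 := by
        rw [ha', List.take_append_of_le_length (by simp [List.length_take, Nat.min_eq_left hn])]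
        rw [List.take_of_length_le (by simp [List.length_take, Nat.min_eq_left hn])]
      have hL : pvL n a' = (pvL n a).map (fun v => v - 1) := by
        unfold pvL
        rw [htake, List.filter_map]
        have hfil : (a.take n.toNat).filter ((fun x => x != 0) ∘ h2)
            = (a.take n.toNat).filter (fun x => x != 0) := by
          apply List.filter_congr
          intro x hx
          have hev := he x hx
          have hd : (2:Int) ∣ x := (PySem.Int.mod_eq_zero_iff_dvd x 2).mp hev
          obtain ⟨y, hy⟩ := hd
          have hx2 : h2 x = y := by
            rw [hh2]; simp only []
            rw [PySem.Int.floordiv_eq_ediv_of_pos (by omega), hy,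
              Int.mul_ediv_cancel_left _ (by norm_num)]
          rw [hy] at hx2
          rw [hy]
          rcases eq_or_ne y 0 with h0 | h0
          · subst h0
            simp only [mul_zero] at hx2 ⊢
            simp [hx2]
          · have h20 : (2:Int) * y ≠ 0 := mul_ne_zero two_ne_zero h0
            have e1 : (y != 0) = true := by simp [h0]
            have e2 : ((2:Int) * y != 0) = true := by simp [h20]
            simp only [Function.comp_apply]
            rw [hx2, e1, e2]
        rw [hfil, List.map_map, List.map_map]
        apply List.map_congr_left
        intro x hx
        have hx1 := List.mem_filter.mp hx
        have hev := he x hx1.1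
        have hx0 : x ≠ 0 := by simpa using hx1.2
        simp only [Function.comp_apply]
        rw [hh2]
        exact pvV2_even x hev hx0
      have hmin' : PySem.List.min? (pvL n a') (fun v => v) = some (m - 1) := by
        rw [hL]
        match hEq : pvL n a with
        | [] =>
          rw [hEq] at hmin
          exact absurd hmin (not_eq_of_beq_eq_false rfl)
        | z :: t =>
          rw [hEq] at hmin
          rw [PySem.List.min?_id_cons] at hmin
          have hm : t.foldl min z = m := by injection hmin
          rw [List.map_cons, PySem.List.min?_id_cons, pvFoldlMin, hm]
      have := ih a' (cnt + 1) (m - 1) (hlen' ▸ hn) hmin' (by push_cast at hf ⊢; omega)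
      simp only [pvWhile, hpass, if_true]
      rw [this]
      omega

theorem min_opr_main (n : Int) (a : List Int) (hdom : Dom_min_opr n a)
    (hpre : Pre_min_opr n a) : min_opr n a = min_opr_alt n a := by
  unfold min_opr min_opr_alt
  by_cases hall : ∀ x ∈ a, PySem.Int.mod x 2 = 0
  · have hallb : a.all (fun x => PySem.Int.mod x 2 == 0) = true := by
      simp only [List.all_eq_true, beq_iff_eq]; exact hall
    have hanyb : a.any (fun x => decide (PySem.Int.mod x 2 ≠ 0)) = false := by
      simp only [List.any_eq_false, decide_eq_true_eq, ne_eq, not_not]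
      exact hall
    obtain ⟨hn, x0, hx0m, hx0⟩ := hpre hall
    have hn0 : (0:Int) ≤ n := by
      by_contra hc
      have hz : n.toNat = 0 := by omega
      rw [hz] at hx0m; simp at hx0m
    have hslice : PySem.List.slice a none (some n) = a.take n.toNat :=
      PySem.List.slice_to a hn0
    have hnlen : n.toNat ≤ a.length := by omega
    -- the valuation list is nonempty
    have hmemL : pvV2 x0 ∈ pvL n a :=
      List.mem_map.mpr ⟨x0, List.mem_filter.mpr ⟨hx0m, by simpa using hx0⟩, rfl⟩
    match hEq : pvL n a with
    | [] => rw [hEq] at hmemL; simp at hmemL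
    | z :: t =>
      have hmin : PySem.List.min? (pvL n a) (fun v => v) = some (t.foldl min z) := by
        rw [hEq, PySem.List.min?_id_cons]
      set m := t.foldl min z with hm
      have hmem := PySem.List.min?_mem hmin
      have hbound : m < (40:Int) := by
        rw [hEq] at hmem
        have : m ∈ pvL n a := hEq ▸ hmem
        obtain ⟨y, hyf, hyv⟩ := List.mem_map.mp this
        have hy1 := List.mem_filter.mp hyf
        have hya : y ∈ a := List.mem_of_mem_take hy1.1
        have hy0 : y ≠ 0 := by simpa using hy1.2
        have hdy : pvDomInt y = true := by
          unfold Dom_min_opr at hdom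
          simp only [Bool.and_eq_true, List.all_eq_true] at hdom
          exact hdom.2 y hya
        have habs : y.natAbs ≤ 2 ^ 31 := by
          unfold pvDomInt at hdy
          simp only [decide_eq_true_eq] at hdy
          omega
        have := pvV2_le_pow 31 y hy0 habs
        omega
      have hres := pvW n 40 a 0 m hnlen hmin (by exact_mod_cast hbound)
      rw [hallb, if_pos rfl, hres, hanyb, if_neg (by simp), hslice]
      rw [show ((a.take n.toNat).filter (fun x => x != 0)).map pvV2 = pvL n a from rfl, hmin]
      show (0:Int) + m = m
      omega
  · have hallb : a.all (fun x => PySem.Int.mod x 2 == 0) = false := by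
      simp only [List.all_eq_false]
      push Not at hall
      obtain ⟨x, hx1, hx2⟩ := hall
      exact ⟨x, hx1, by simpa using hx2⟩
    have hanyb : a.any (fun x => decide (PySem.Int.mod x 2 ≠ 0)) = true := by
      simp only [List.any_eq_true, decide_eq_true_eq]
      push Not at hall
      exact hall
    rw [hallb, hanyb, if_neg (by simp), if_pos rfl]

-- ===== VERDICT (by name: the statement is the Claim_ definition above) =====
theorem min_opr_spec : Claim_equal_min_opr := by
  intro n a hdom hpre
  unfold Spec_min_opr
  exact min_opr_main n a hdom hpre
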